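-- pv_equiv track=rewrite | github.com/Konano/database-special-topic-training-hw | lab2/main.py | findGt
-- ===== SOURCE A (Python) =====
-- def findGt(L, val):
--     num, pow2 = 0, 1
--     while num + pow2 <= len(L):
--         if L[num + pow2 - 1] <= val:
--             num, pow2 = num + pow2, pow2 * 2
--         else:
--             break
--     pow2 = pow2 // 2
--     while pow2 > 0:
--         if num + pow2 <= len(L) and L[num + pow2 - 1] <= val:
--             num += pow2
--         pow2 = pow2 // 2
--     return len(L) - num
-- ===== SOURCE B (Python) =====
-- def findGt(L, val):
--     lo, hi = 0, len(L)
--     while lo < hi: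
--         mid = (lo + hi) // 2
--         if L[mid] <= val:
--             lo = mid + 1
--         else:
--             hi = mid
--     return len(L) - lo
-- ===== Notes on version B (the rewrite author's own statement) =====
-- stated objective: simpler
-- what changed: Replaces A's two-phase galloping search (exponential doubling then power-of-two refinement) with a single standard binary search over [0, len(L)) computing the bisect_right position.
-- outside the precondition, e.g. on findGt([5, 1], 3): A returns 2, B returns 0
import Mathlib
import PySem

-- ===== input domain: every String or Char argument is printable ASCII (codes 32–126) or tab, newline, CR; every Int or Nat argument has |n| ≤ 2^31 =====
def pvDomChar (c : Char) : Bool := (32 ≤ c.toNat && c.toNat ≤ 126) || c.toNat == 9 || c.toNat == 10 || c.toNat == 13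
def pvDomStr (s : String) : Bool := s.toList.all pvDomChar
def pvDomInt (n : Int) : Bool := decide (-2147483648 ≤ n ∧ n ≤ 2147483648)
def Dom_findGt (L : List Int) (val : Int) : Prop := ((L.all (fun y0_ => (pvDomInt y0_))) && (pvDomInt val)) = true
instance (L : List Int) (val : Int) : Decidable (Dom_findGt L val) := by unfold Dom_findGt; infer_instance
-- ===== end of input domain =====

-- B replaces A's two-phase galloping search by a single standard binary search (simpler, same O(log n) cost).
-- All loops are ported with a structural fuel parameter large enough to be unreachable (a totality guard only).

-- ===== PORT A =====
-- first while loop: exponential doubling while L[num+pow2-1] <= val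
def findGtGallop (L : List Int) (val : Int) (fuel num pow2 : Nat) : Nat × Nat :=
  match fuel with
  | 0 => (num, pow2)
  | fuel + 1 =>
    if num + pow2 ≤ L.length then
      if PySem.List.pyGetD L ((num + pow2 - 1 : Nat) : Int) 0 ≤ val then
        findGtGallop L val fuel (num + pow2) (pow2 * 2)
      else (num, pow2)
    else (num, pow2)

-- second while loop: refine with halving powers of two
def findGtRefine (L : List Int) (val : Int) (fuel num pow2 : Nat) : Nat :=
  match fuel with
  | 0 => num
  | fuel + 1 =>
    if pow2 > 0 then
      let num' := if num + pow2 ≤ L.length ∧ PySem.List.pyGetD L ((num + pow2 - 1 : Nat) : Int) 0 ≤ val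
                  then num + pow2 else num
      findGtRefine L val fuel num' (pow2 / 2)
    else num

def findGt (L : List Int) (val : Int) : Int :=
  let (num, pow2) := findGtGallop L val (L.length + 1) 0 1
  ((L.length : Int)) - (findGtRefine L val (pow2 / 2 + 1) num (pow2 / 2) : Int)

-- ===== PORT B =====
-- while lo < hi: binary search for the bisect_right position
def findGtBS (L : List Int) (val : Int) (fuel lo hi : Nat) : Nat :=
  match fuel with
  | 0 => lo
  | fuel + 1 =>
    if lo < hi then
      let mid := (lo + hi) / 2
      if PySem.List.pyGetD L ((mid : Nat) : Int) 0 ≤ val then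
        findGtBS L val fuel (mid + 1) hi
      else
        findGtBS L val fuel lo mid
    else lo

def findGt_alt (L : List Int) (val : Int) : Int :=
  ((L.length : Int)) - (findGtBS L val (L.length + 1) 0 L.length : Int)

-- ===== PRECONDITION & SPEC =====
-- Pre_ requires the elements ≤ val to form a prefix of L (true of every sorted list, the
-- search's natural domain): otherwise the landing position of either search is unspecified
-- and A's and B's values are both accidental and equally defensible.
def Pre_findGt (L : List Int) (val : Int) : Prop := L.Pairwise (fun a b => b ≤ val → a ≤ val)
instance (L : List Int) (val : Int) : Decidable (Pre_findGt L val) := by unfold Pre_findGt; infer_instance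

def pvWitness_findGt : List Int × Int := ([-3, 0, 0, 2, 7], 0)

def Spec_findGt (L : List Int) (val : Int) (out : Int) : Prop := out = findGt_alt L val
instance (L : List Int) (val : Int) (out : Int) : Decidable (Spec_findGt L val out) := by unfold Spec_findGt; infer_instance

-- ===== CLAIM (what is proved, stated in full; the proofs are below) =====
def Claim_equal_findGt : Prop := ∀ (L : List Int) (val : Int), Dom_findGt L val → Pre_findGt L val → Spec_findGt L val (findGt L val)

-- ===== LEMMAS AND PROOFS =====

-- the number of elements ≤ val in a sorted list = length of the ≤-val prefix
def cLe (L : List Int) (val : Int) : Nat := (L.takeWhile (fun x => decide (x ≤ val))).length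

theorem cLe_le_length (L : List Int) (val : Int) : cLe L val ≤ L.length := by
  simpa [cLe] using (List.takeWhile_sublist _).length_le

-- when the elements ≤ val form a prefix, L[i] ≤ val iff i < cLe L val
theorem sorted_le_iff (L : List Int) (val : Int)
    (hs : L.Pairwise (fun a b => b ≤ val → a ≤ val))
    (i : Nat) (hi : i < L.length) : L[i] ≤ val ↔ i < cLe L val := by
  have htle : cLe L val ≤ L.length := cLe_le_length L val
  constructor
  · intro h
    by_contra hit
    have ht : cLe L val ≤ i := by omega
    have htlt : cLe L val < L.length := by omega
    -- the element at position cLe does not satisfy the predicate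
    have hdrop : 0 < (L.dropWhile (fun x => decide (x ≤ val))).length := by
      have := List.takeWhile_append_dropWhile (p := fun x => decide (x ≤ val)) (l := L)
      have hlen := congrArg List.length this
      simp only [List.length_append] at hlen
      simp only [cLe] at htlt
      omega
    have hnot := List.dropWhile_get_zero_not (p := fun x => decide (x ≤ val)) L hdrop
    have hsplit : L = L.takeWhile (fun x => decide (x ≤ val)) ++ L.dropWhile (fun x => decide (x ≤ val)) :=
      (List.takeWhile_append_dropWhile).symm
    have hgetd : L[cLe L val] = (L.dropWhile (fun x => decide (x ≤ val))).get ⟨0, hdrop⟩ := by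
      rw [List.getElem_of_eq hsplit htlt,
          List.getElem_append_right (by simp [cLe])]
      simp [cLe, List.get_eq_getElem]
    have hnotval : ¬ L[cLe L val] ≤ val := by
      rw [hgetd]; simpa using hnot
    rcases Nat.eq_or_lt_of_le ht with heq | hlt
    · exact hnotval (heq ▸ h)
    · have := (List.pairwise_iff_getElem.mp hs) (cLe L val) i htlt hi hlt
      exact hnotval (this h)
  · intro h
    have hgt : L[i] = (L.takeWhile (fun x => decide (x ≤ val)))[i]'(by simpa [cLe] using h) :=
      ((List.takeWhile_prefix _).getElem _).symm
    have := List.mem_takeWhile_imp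
      (List.getElem_mem (l := L.takeWhile (fun x => decide (x ≤ val))) (by simpa [cLe] using h))
    rw [hgt]
    simpa using this

-- the loop test `num+pow2 ≤ len ∧ L[num+pow2-1] ≤ val` characterised via cLe
theorem test_iff (L : List Int) (val : Int) (hs : L.Pairwise (fun a b => b ≤ val → a ≤ val)) (num pow2 : Nat)
    (hp : 0 < pow2) (hlen : num + pow2 ≤ L.length) :
    (PySem.List.pyGetD L ((num + pow2 - 1 : Nat) : Int) 0 ≤ val) ↔ num + pow2 ≤ cLe L val := by
  have hidx : num + pow2 - 1 < L.length := by omega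
  rw [PySem.List.pyGetD_natCast, List.getD_eq_getElem _ _ hidx,
      sorted_le_iff L val hs _ hidx]
  omega

theorem refine_zero (L : List Int) (val : Int) (fuel num : Nat) :
    findGtRefine L val fuel num 0 = num := by
  cases fuel <;> simp [findGtRefine]

theorem refine_spec (L : List Int) (val : Int) (hs : L.Pairwise (fun a b => b ≤ val → a ≤ val)) :
    ∀ (k fuel num : Nat), k + 1 ≤ fuel → num ≤ cLe L val → cLe L val < num + 2 * 2 ^ k →
      findGtRefine L val fuel num (2 ^ k) = cLe L val := by
  intro k
  induction k with
  | zero =>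
    intro fuel num hf h1 h2
    obtain ⟨f, rfl⟩ : ∃ f, fuel = f + 1 := ⟨fuel - 1, by omega⟩
    rw [findGtRefine]
    simp only [pow_zero, if_pos (by omega : (1:Nat) > 0)]
    have hnum : num = cLe L val ∨ num + 1 = cLe L val := by omega
    rcases hnum with h | h
    · have hneg : ¬ (num + 1 ≤ L.length ∧ PySem.List.pyGetD L ((num + 1 - 1 : Nat) : Int) 0 ≤ val) := by
        intro ⟨hl, ht⟩
        have := (test_iff L val hs num 1 (by omega) hl).mp ht
        omega
      simp only [hneg, if_false]
      rw [show (1:Nat)/2 = 0 from rfl, refine_zero]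
      omega
    · have hl : num + 1 ≤ L.length := by
        have := cLe_le_length L val; omega
      have ht := (test_iff L val hs num 1 (by omega) hl).mpr (by omega)
      simp only [hl, ht, and_self, if_true]
      rw [show (1:Nat)/2 = 0 from rfl, refine_zero]
      omega
  | succ k ih =>
    intro fuel num hf h1 h2
    obtain ⟨f, rfl⟩ : ∃ f, fuel = f + 1 := ⟨fuel - 1, by omega⟩
    rw [findGtRefine]
    have hp : 0 < 2 ^ (k + 1) := by positivity
    simp only [if_pos hp]
    have hhalf : 2 ^ (k + 1) / 2 = 2 ^ k := by
      rw [pow_succ]; omega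
    have hps : (2:Nat) ^ (k + 1) = 2 ^ k * 2 := pow_succ 2 k
    by_cases hl : num + 2 ^ (k + 1) ≤ L.length
    · by_cases ht : PySem.List.pyGetD L ((num + 2 ^ (k + 1) - 1 : Nat) : Int) 0 ≤ val
      · have hle := (test_iff L val hs num (2 ^ (k + 1)) hp hl).mp ht
        simp only [hl, ht, and_self, if_true, hhalf]
        exact ih f _ (by omega) hle (by omega)
      · have hgt : ¬ num + 2 ^ (k + 1) ≤ cLe L val := fun hc =>
          ht ((test_iff L val hs num (2 ^ (k + 1)) hp hl).mpr hc)
        simp only [hl, ht, and_false, if_false, hhalf]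
        exact ih f _ (by omega) h1 (by omega)
    · have hc : cLe L val < num + 2 ^ (k + 1) := by
        have := cLe_le_length L val; omega
      simp only [hl, false_and, if_false, hhalf]
      exact ih f _ (by omega) h1 (by omega)

theorem gallop_spec (L : List Int) (val : Int) (hs : L.Pairwise (fun a b => b ≤ val → a ≤ val)) :
    ∀ (fuel num k : Nat), L.length + 1 - (num + 2 ^ k) ≤ fuel → num ≤ cLe L val →
      ∃ n j, findGtGallop L val fuel num (2 ^ k) = (n, 2 ^ j) ∧
        n ≤ cLe L val ∧ cLe L val < n + 2 ^ j := by
  intro fuel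
  induction fuel with
  | zero =>
    intro num k hf h1
    exact ⟨num, k, rfl, h1, by have := cLe_le_length L val; omega⟩
  | succ fuel ih =>
    intro num k hf h1
    rw [findGtGallop]
    by_cases hl : num + 2 ^ k ≤ L.length
    · simp only [if_pos hl]
      by_cases ht : PySem.List.pyGetD L ((num + 2 ^ k - 1 : Nat) : Int) 0 ≤ val
      · have hle := (test_iff L val hs num (2 ^ k) (by positivity) hl).mp ht
        simp only [ht, if_true]
        have hrw : 2 ^ k * 2 = 2 ^ (k + 1) := by rw [pow_succ]
        have hp1 : 1 ≤ (2:Nat) ^ (k + 1) := Nat.one_le_two_pow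
        rcases ih (num + 2 ^ k) (k + 1) (by omega) hle with ⟨n, j, heq, h2, h3⟩
        exact ⟨n, j, by rw [hrw]; exact heq, h2, h3⟩
      · simp only [ht, if_false]
        have : ¬ num + 2 ^ k ≤ cLe L val := fun hc =>
          ht ((test_iff L val hs num (2 ^ k) (by positivity) hl).mpr hc)
        exact ⟨num, k, rfl, h1, by omega⟩
    · simp only [if_neg hl]
      exact ⟨num, k, rfl, h1, by have := cLe_le_length L val; omega⟩

theorem bs_spec (L : List Int) (val : Int) (hs : L.Pairwise (fun a b => b ≤ val → a ≤ val)) :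
    ∀ (fuel lo hi : Nat), hi - lo ≤ fuel → lo ≤ cLe L val → cLe L val ≤ hi → hi ≤ L.length →
      findGtBS L val fuel lo hi = cLe L val := by
  intro fuel
  induction fuel with
  | zero =>
    intro lo hi hf h1 h2 h3
    simp only [findGtBS]
    omega
  | succ fuel ih =>
    intro lo hi hf h1 h2 h3
    rw [findGtBS]
    by_cases hlt : lo < hi
    · simp only [if_pos hlt]
      have hmid : (lo + hi) / 2 < L.length := by omega
      have hiff : (PySem.List.pyGetD L (((lo + hi) / 2 : Nat) : Int) 0 ≤ val) ↔ (lo + hi) / 2 < cLe L val := by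
        rw [PySem.List.pyGetD_natCast, List.getD_eq_getElem _ _ hmid]
        exact sorted_le_iff L val hs _ hmid
      by_cases ht : PySem.List.pyGetD L (((lo + hi) / 2 : Nat) : Int) 0 ≤ val
      · simp only [ht, if_true]
        exact ih _ _ (by omega) (by have := hiff.mp ht; omega) h2 h3
      · simp only [ht, if_false]
        exact ih _ _ (by omega) h1 (by have := hiff; omega) (by omega)
    · simp only [if_neg hlt]; omega

-- ===== VERDICT (by name: the statement is the Claim_ definition above) =====
theorem findGt_spec : Claim_equal_findGt := by
  intro L val _ hpre
  unfold Spec_findGt findGt findGt_alt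
  have hb := bs_spec L val hpre (L.length + 1) 0 L.length (by omega) (by omega)
    (cLe_le_length L val) (le_refl _)
  rcases gallop_spec L val hpre (L.length + 1) 0 0 (by omega) (by omega) with
    ⟨n, j, heq, h1, h2'⟩
  simp only [pow_zero] at heq
  rw [heq]
  change (L.length : Int) - (findGtRefine L val (2 ^ j / 2 + 1) n (2 ^ j / 2) : Int) = _
  have hr : findGtRefine L val (2 ^ j / 2 + 1) n (2 ^ j / 2) = cLe L val := by
    cases j with
    | zero =>
      rw [show (2:Nat) ^ 0 / 2 = 0 from rfl, refine_zero]
      simp only [pow_zero] at h2'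
      omega
    | succ k =>
      have hh : 2 ^ (k + 1) / 2 = 2 ^ k := by rw [pow_succ]; omega
      rw [hh]
      exact refine_spec L val hpre k _ n
        (by have h1k := Nat.lt_two_pow_self (n := k); omega) h1
        (by have := pow_succ 2 k; omega)
  rw [hr, hb]
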